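-- pv_equiv track=rewrite | github.com/bekahcav/WinterETCSeasonalModel | pred_functions.py | most_common_type
-- ===== SOURCE A (Python) =====
-- def most_common_type(cats_dict):
--
-- 	highest_name = list(cats_dict.keys())[0]
-- 	highest_val = cats_dict[highest_name]
--
-- 	for key in list(cats_dict.keys())[1:]:
-- 		if cats_dict[key] > highest_val:
-- 			highest_name = key
-- 			highest_val = cats_dict[key]
-- 		elif cats_dict[key] == highest_val:
-- 			highest_name += (" and "+key)
--
-- 	if highest_val == 0:
-- 		highest_name = 'No recorded precipitation'
--
-- 	return highest_name, highest_val
-- ===== SOURCE B (Python) =====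
-- def most_common_type(cats_dict):
--     highest_val = max(cats_dict.values())
--     highest_name = " and ".join(key for key, val in cats_dict.items() if val == highest_val)
--     if highest_val == 0:
--         highest_name = 'No recorded precipitation'
--     return highest_name, highest_val
-- ===== Notes on version B (the rewrite author's own statement) =====
-- stated objective: simpler
-- what changed: Instead of A's single stateful scan that tracks a running maximum and a tie-concatenated name (resetting the name whenever a strictly larger value appears), B computes the maximum of the values first and then joins, in one comprehension, the keys whose value equals that maximum.
-- outside the precondition, e.g. on most_common_type({}): A raises IndexError, B raises ValueError
import Mathlib
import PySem

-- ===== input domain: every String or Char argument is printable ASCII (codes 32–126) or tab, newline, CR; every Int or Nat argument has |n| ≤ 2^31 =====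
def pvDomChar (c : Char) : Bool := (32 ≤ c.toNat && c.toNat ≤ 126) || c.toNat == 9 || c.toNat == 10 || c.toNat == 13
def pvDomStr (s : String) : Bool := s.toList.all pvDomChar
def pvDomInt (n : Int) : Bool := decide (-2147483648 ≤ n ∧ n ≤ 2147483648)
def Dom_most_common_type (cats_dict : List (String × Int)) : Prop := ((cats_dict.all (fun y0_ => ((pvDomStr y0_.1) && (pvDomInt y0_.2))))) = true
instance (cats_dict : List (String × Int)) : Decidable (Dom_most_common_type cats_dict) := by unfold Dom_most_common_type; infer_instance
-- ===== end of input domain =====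

-- B replaces A's single stateful scan (running max + tie-concatenated name with resets) by
-- "compute the max of the values, then join the keys whose value equals it": simpler decomposition.

-- ===== PORT A =====
def most_common_type (cats_dict : List (String × Int)) : String × Int :=
  let d : PySem.Dict String Int := ⟨cats_dict⟩
  match PySem.List.pyGet? d.keys 0 with
  | none => ("", 0)      -- list(cats_dict.keys())[0] raises IndexError on an empty dict; outside Pre_
  | some k0 =>
    let hv0 := d.getD k0 0
    let st := (PySem.List.slice d.keys (some 1) none).foldl
      (fun (st : String × Int) key =>
        let v := d.getD key 0
        if v > st.2 then (key, v)
        else if v = st.2 then (st.1 ++ " and " ++ key, st.2)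
        else st) (k0, hv0)
    if st.2 = 0 then ("No recorded precipitation", st.2) else st

-- ===== PORT B =====
def most_common_type_alt (cats_dict : List (String × Int)) : String × Int :=
  let d : PySem.Dict String Int := ⟨cats_dict⟩
  match PySem.List.max? d.values (fun v => v) with
  | none => ("", 0)      -- max() raises ValueError on an empty dict; outside Pre_
  | some hv =>
    let hn := PySem.Str.join " and " ((d.items.filter (fun p => p.2 = hv)).map Prod.fst)
    if hv = 0 then ("No recorded precipitation", hv) else (hn, hv)

-- ===== PRECONDITION & SPEC =====
-- Pre_ excludes the empty dict, on which both A (IndexError) and B (ValueError) raise, and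
-- association lists with duplicate keys, which do not encode any Python dict (dict keys are unique).
def Pre_most_common_type (cats_dict : List (String × Int)) : Prop :=
  cats_dict ≠ [] ∧ (cats_dict.map Prod.fst).Nodup
instance (cats_dict : List (String × Int)) : Decidable (Pre_most_common_type cats_dict) := by
  unfold Pre_most_common_type; infer_instance
def pvWitness_most_common_type : (List (String × Int)) := [("rain", 3), ("snow", 3), ("hail", 1)]

def Spec_most_common_type (cats_dict : List (String × Int)) (out : String × Int) : Prop := out = most_common_type_alt cats_dict
instance (cats_dict : List (String × Int)) (out : String × Int) : Decidable (Spec_most_common_type cats_dict out) := by unfold Spec_most_common_type; infer_instance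

-- ===== CLAIM (what is proved, stated in full; the proofs are below) =====
def Claim_equal_most_common_type : Prop := ∀ (cats_dict : List (String × Int)), Dom_most_common_type cats_dict → Pre_most_common_type cats_dict → Spec_most_common_type cats_dict (most_common_type cats_dict)

-- ===== LEMMAS AND PROOFS =====

-- glue a tie onto the head of a join: join s ((a ++ s ++ b) :: r) = join s (a :: b :: r)
lemma join_glue (s a b : String) (r : List String) :
    PySem.Str.join s ((a ++ s ++ b) :: r) = PySem.Str.join s (a :: b :: r) := by
  apply String.toList_inj.mp
  cases r with
  | nil =>
    simp only [PySem.Str.toList_join, List.map_cons, List.map_nil, String.toList_append,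
      PySem.Chars.join_cons_cons, PySem.Chars.join_singleton]
  | cons c r' =>
    simp only [PySem.Str.toList_join, List.map_cons, String.toList_append,
      PySem.Chars.join_cons_cons]
    simp [List.append_assoc]

-- characterisation of A's tie-tracking fold over the (key, value) pairs:
-- the result value is the running max M, and the result name joins (with " and ") the initial
-- name (iff the initial value already equals M) with the keys of the pairs whose value is M.
lemma foldA_char (l : List (String × Int)) (n : String) (v : Int) :
    l.foldl (fun (st : String × Int) p =>
        if p.2 > st.2 then (p.1, p.2)
        else if p.2 = st.2 then (st.1 ++ " and " ++ p.1, st.2)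
        else st) (n, v)
    = (PySem.Str.join " and "
         ((if v = l.foldl (fun a p => max a p.2) v then [n] else [])
            ++ (l.filter (fun p => p.2 = l.foldl (fun a p => max a p.2) v)).map Prod.fst),
       l.foldl (fun a p => max a p.2) v) := by
  induction l generalizing n v with
  | nil =>
    have h1 : PySem.Str.join " and " [n] = n := by
      apply String.toList_inj.mp
      rw [PySem.Str.toList_join, List.map_cons, List.map_nil, PySem.Chars.join_singleton]
    simp [h1]
  | cons p t ih =>
    simp only [List.foldl_cons]
    by_cases hgt : p.2 > v
    · rw [if_pos hgt]
      simp only [show max v p.2 = p.2 from by omega]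
      rw [ih]
      have hle : p.2 ≤ t.foldl (fun a q => max a q.2) p.2 :=
        (PySem.List.le_foldl_max_int t (fun q => q.2) p.2).1
      rw [if_neg (show ¬ v = t.foldl (fun a q => max a q.2) p.2 from by omega)]
      by_cases hp : p.2 = t.foldl (fun a q => max a q.2) p.2
      · simp only [List.filter_cons]
        rw [if_pos (decide_eq_true hp), if_pos hp]
        simp
      · simp only [List.filter_cons]
        rw [if_neg (by simpa using hp : ¬ decide (p.2 = t.foldl (fun a q => max a q.2) p.2) = true),
          if_neg hp]
    · by_cases heq : p.2 = v
      · rw [if_neg hgt, if_pos heq]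
        simp only [show max v p.2 = v from by omega]
        rw [ih]
        by_cases hv : v = t.foldl (fun a q => max a q.2) v
        · rw [if_pos hv, if_pos hv]
          simp only [List.filter_cons]
          rw [if_pos (by rw [heq]; exact decide_eq_true hv :
            decide (p.2 = t.foldl (fun a q => max a q.2) v) = true)]
          simp only [List.map_cons, List.cons_append, List.nil_append]
          exact congrArg (fun x => (x, t.foldl (fun a q => max a q.2) v))
            (join_glue " and " n p.1 _)
        · rw [if_neg hv, if_neg hv]
          simp only [List.filter_cons]
          rw [if_neg (by simpa using (heq ▸ hv : ¬ p.2 = _) :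
            ¬ decide (p.2 = t.foldl (fun a q => max a q.2) v) = true)]
      · rw [if_neg hgt, if_neg heq]
        simp only [show max v p.2 = v from by omega]
        rw [ih]
        have hle : v ≤ t.foldl (fun a q => max a q.2) v :=
          (PySem.List.le_foldl_max_int t (fun q => q.2) v).1
        simp only [List.filter_cons]
        rw [if_neg (by simp; omega :
          ¬ decide (p.2 = t.foldl (fun a q => max a q.2) v) = true)]

-- ===== VERDICT (by name: the statement is the Claim_ definition above) =====
theorem most_common_type_spec : Claim_equal_most_common_type := by
  intro cats_dict _ hpre
  obtain ⟨hne, hnd⟩ := hpre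
  obtain ⟨⟨k0, v0⟩, t, rfl⟩ : ∃ h t, cats_dict = h :: t := by
    cases cats_dict with
    | nil => exact absurd rfl hne
    | cons h t => exact ⟨h, t, rfl⟩
  unfold Spec_most_common_type most_common_type most_common_type_alt
  have hnd' : ((PySem.Dict.mk ((k0, v0) :: t) : PySem.Dict String Int)).keys.Nodup := by
    simpa [PySem.Dict.keys] using hnd
  have hget : ∀ p ∈ (k0, v0) :: t,
      (PySem.Dict.mk ((k0, v0) :: t) : PySem.Dict String Int).getD p.1 0 = p.2 :=
    fun p hp => PySem.Dict.getD_of_mem_items _ hp hnd' 0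
  simp only [PySem.Dict.keys, PySem.Dict.values, List.map_cons,
    show PySem.List.pyGet? (k0 :: t.map (fun x => x.1)) 0 = some k0 from by simp [pysem],
    PySem.List.slice_from_one, List.tail_cons, PySem.List.max?_id_cons,
    hget (k0, v0) List.mem_cons_self]
  rw [List.foldl_map, List.foldl_map]
  rw [PySem.List.foldl_congr_mem t
    (fun (st : String × Int) p =>
      if (PySem.Dict.mk ((k0, v0) :: t) : PySem.Dict String Int).getD p.1 0 > st.2 then
        (p.1, (PySem.Dict.mk ((k0, v0) :: t) : PySem.Dict String Int).getD p.1 0)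
      else if (PySem.Dict.mk ((k0, v0) :: t) : PySem.Dict String Int).getD p.1 0 = st.2 then
        (st.1 ++ " and " ++ p.1, st.2)
      else st)
    (fun (st : String × Int) p =>
      if p.2 > st.2 then (p.1, p.2)
      else if p.2 = st.2 then (st.1 ++ " and " ++ p.1, st.2)
      else st)
    (k0, v0)
    (by intro acc p hp; simp only [hget p (List.mem_cons_of_mem _ hp)])]
  rw [foldA_char t k0 v0]
  by_cases hM : List.foldl (fun a p => max a p.2) v0 t = 0
  · rw [if_pos hM, if_pos hM]
  · rw [if_neg hM, if_neg hM]
    simp only [List.filter_cons]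
    by_cases hv0 : v0 = List.foldl (fun a p => max a p.2) v0 t
    · rw [if_pos hv0, if_pos (decide_eq_true hv0)]
      simp
    · rw [if_neg hv0, if_neg (by simpa using hv0 :
        ¬ decide (v0 = List.foldl (fun a p => max a p.2) v0 t) = true)]
      simp
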